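-- pv_equiv track=rewrite | github.com/lunyiliu/TJU-QA-system | mysql_script.py | unrepeat
-- ===== SOURCE A (Python) =====
-- def unrepeat(tag_list):
--     result=[]
--     for i in range(1,7):
--         string=''
--         flag=0
--         for n,s in enumerate(tag_list):
--             if s[1]==i and flag==0:
--                string=string+s[0]
--                flag=1
--             elif s[1]==i and flag==1:
--                string=string+';'+s[0]
--         if string!='':
--             result.append(string)
--         else:
--             result.append('其他')
--     return result
-- ===== SOURCE B (Python) =====
-- def unrepeat(tag_list):
--     groups = {}
--     for s in tag_list:
--         groups.setdefault(s[1], []).append(s[0])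
--     result = []
--     for i in range(1, 7):
--         joined = ';'.join(groups.get(i, []))
--         result.append(joined if joined != '' else '其他')
--     return result
-- ===== Notes on version B (the rewrite author's own statement) =====
-- stated objective: simpler
-- what changed: Replaces six flag-driven scans of tag_list (one per label, concatenating strings piece by piece) with a single grouping pass into a dict of lists followed by one ';'.join per label.
import Mathlib
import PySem

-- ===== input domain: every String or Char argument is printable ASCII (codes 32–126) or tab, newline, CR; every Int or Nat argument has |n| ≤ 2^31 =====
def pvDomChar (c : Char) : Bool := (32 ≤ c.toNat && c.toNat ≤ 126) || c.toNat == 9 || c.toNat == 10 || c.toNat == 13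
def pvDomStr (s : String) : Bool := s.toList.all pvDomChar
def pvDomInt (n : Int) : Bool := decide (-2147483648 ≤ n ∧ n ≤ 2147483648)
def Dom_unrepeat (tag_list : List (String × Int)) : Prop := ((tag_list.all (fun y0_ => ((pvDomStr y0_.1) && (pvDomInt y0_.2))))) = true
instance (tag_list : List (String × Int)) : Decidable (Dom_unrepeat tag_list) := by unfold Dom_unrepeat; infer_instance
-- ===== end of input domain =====

-- B replaces A's six flag-driven scans of tag_list with one grouping pass into a dict of
-- lists followed by a ';'.join per label (objective: simpler).

-- ===== PORT A =====
def unrepeat (tag_list : List (String × Int)) : List String :=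
  (PySem.List.pyRange 1 7 1).foldl (fun result i =>
    let sf := (PySem.List.enumerate tag_list 0).foldl
      (fun (sf : String × Int) ns =>
        if ns.2.2 == i && sf.2 == 0 then (sf.1 ++ ns.2.1, 1)
        else if ns.2.2 == i && sf.2 == 1 then (sf.1 ++ ";" ++ ns.2.1, sf.2)
        else sf) ("", 0)
    if sf.1 ≠ "" then result ++ [sf.1] else result ++ ["其他"]) []

-- ===== PORT B =====
def unrepeat_alt (tag_list : List (String × Int)) : List String :=
  let groups : PySem.Dict Int (List String) :=
    tag_list.foldl (fun d s => d.modify s.2 [] (fun xs => xs ++ [s.1])) PySem.Dict.empty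
  (PySem.List.pyRange 1 7 1).foldl (fun result i =>
    let joined := PySem.Str.join ";" (groups.getD i [])
    result ++ [if joined ≠ "" then joined else "其他"]) []

-- ===== PRECONDITION & SPEC =====
def Spec_unrepeat (tag_list : List (String × Int)) (out : List String) : Prop := out = unrepeat_alt tag_list
instance (tag_list : List (String × Int)) (out : List String) : Decidable (Spec_unrepeat tag_list out) := by unfold Spec_unrepeat; infer_instance

-- ===== CLAIM (what is proved, stated in full; the proofs are below) =====
def Claim_equal_unrepeat : Prop := ∀ (tag_list : List (String × Int)), Dom_unrepeat tag_list → Spec_unrepeat tag_list (unrepeat tag_list)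

-- ===== LEMMAS AND PROOFS =====

/-- The first components of the entries of `l` labelled `i`, in order. -/
def groupOf (i : Int) (l : List (String × Int)) : List String :=
  (l.filter (fun s => s.2 == i)).map Prod.fst

/-- `";" ++ x₁ ++ ";" ++ x₂ ++ …` — the tail of a semicolon join. -/
def tailJoin : List String → String
  | [] => ""
  | x :: t => ";" ++ x ++ tailJoin t

theorem groupOf_cons (i : Int) (s : String × Int) (t : List (String × Int)) :
    groupOf i (s :: t) = if s.2 = i then s.1 :: groupOf i t else groupOf i t := by
  by_cases h : s.2 = i <;> simp [groupOf, h]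

theorem join_cons_cons' (x y : String) (t : List String) :
    PySem.Str.join ";" (x :: y :: t) = x ++ (";" ++ PySem.Str.join ";" (y :: t)) := by
  apply String.toList_inj.mp
  simp [PySem.Chars.join_cons_cons]

theorem joinEq (g : List String) (x : String) :
    x ++ tailJoin g = PySem.Str.join ";" (x :: g) := by
  induction g generalizing x with
  | nil =>
    apply String.toList_inj.mp
    simp [tailJoin, PySem.Chars.join_singleton]
  | cons y t ih =>
    rw [join_cons_cons', ← ih y, tailJoin]
    apply String.toList_inj.mp
    simp

theorem inner1 (i : Int) (l : List (String × Int)) :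
    ∀ (n : Int) (str : String),
    (PySem.List.enumerate l n).foldl
      (fun (sf : String × Int) ns =>
        if ns.2.2 == i && sf.2 == 0 then (sf.1 ++ ns.2.1, 1)
        else if ns.2.2 == i && sf.2 == 1 then (sf.1 ++ ";" ++ ns.2.1, sf.2)
        else sf) (str, 1)
    = (str ++ tailJoin (groupOf i l), 1) := by
  induction l with
  | nil => intro n str; simp [PySem.List.enumerate_nil, groupOf, tailJoin]
  | cons s t ih =>
    intro n str
    rw [PySem.List.enumerate_cons]
    by_cases h : s.2 = i
    · calc List.foldl
            (fun (sf : String × Int) ns =>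
              if ns.2.2 == i && sf.2 == 0 then (sf.1 ++ ns.2.1, 1)
              else if ns.2.2 == i && sf.2 == 1 then (sf.1 ++ ";" ++ ns.2.1, sf.2)
              else sf)
            (str, 1) ((n, s) :: PySem.List.enumerate t (n + 1))
          = List.foldl
            (fun (sf : String × Int) ns =>
              if ns.2.2 == i && sf.2 == 0 then (sf.1 ++ ns.2.1, 1)
              else if ns.2.2 == i && sf.2 == 1 then (sf.1 ++ ";" ++ ns.2.1, sf.2)
              else sf)
            (str ++ ";" ++ s.1, 1) (PySem.List.enumerate t (n + 1)) := by
            rw [List.foldl_cons]; congr 1; simp [h]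
        _ = (str ++ tailJoin (groupOf i (s :: t)), 1) := by
            rw [ih (n + 1), groupOf_cons, if_pos h, tailJoin]
            simp [String.append_assoc]
    · calc List.foldl
            (fun (sf : String × Int) ns =>
              if ns.2.2 == i && sf.2 == 0 then (sf.1 ++ ns.2.1, 1)
              else if ns.2.2 == i && sf.2 == 1 then (sf.1 ++ ";" ++ ns.2.1, sf.2)
              else sf)
            (str, 1) ((n, s) :: PySem.List.enumerate t (n + 1))
          = List.foldl
            (fun (sf : String × Int) ns =>
              if ns.2.2 == i && sf.2 == 0 then (sf.1 ++ ns.2.1, 1)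
              else if ns.2.2 == i && sf.2 == 1 then (sf.1 ++ ";" ++ ns.2.1, sf.2)
              else sf)
            (str, 1) (PySem.List.enumerate t (n + 1)) := by
            rw [List.foldl_cons]; congr 1; simp [h]
        _ = (str ++ tailJoin (groupOf i (s :: t)), 1) := by
            rw [ih (n + 1), groupOf_cons, if_neg h]

theorem inner0 (i : Int) (l : List (String × Int)) :
    ∀ (n : Int) (str : String),
    (PySem.List.enumerate l n).foldl
      (fun (sf : String × Int) ns =>
        if ns.2.2 == i && sf.2 == 0 then (sf.1 ++ ns.2.1, 1)
        else if ns.2.2 == i && sf.2 == 1 then (sf.1 ++ ";" ++ ns.2.1, sf.2)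
        else sf) (str, 0)
    = (match groupOf i l with
       | [] => (str, (0 : Int))
       | x :: g => (str ++ x ++ tailJoin g, 1)) := by
  induction l with
  | nil => intro n str; simp [PySem.List.enumerate_nil, groupOf]
  | cons s t ih =>
    intro n str
    rw [PySem.List.enumerate_cons]
    by_cases h : s.2 = i
    · calc List.foldl
            (fun (sf : String × Int) ns =>
              if ns.2.2 == i && sf.2 == 0 then (sf.1 ++ ns.2.1, 1)
              else if ns.2.2 == i && sf.2 == 1 then (sf.1 ++ ";" ++ ns.2.1, sf.2)
              else sf)
            (str, 0) ((n, s) :: PySem.List.enumerate t (n + 1))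
          = List.foldl
            (fun (sf : String × Int) ns =>
              if ns.2.2 == i && sf.2 == 0 then (sf.1 ++ ns.2.1, 1)
              else if ns.2.2 == i && sf.2 == 1 then (sf.1 ++ ";" ++ ns.2.1, sf.2)
              else sf)
            (str ++ s.1, 1) (PySem.List.enumerate t (n + 1)) := by
            rw [List.foldl_cons]; congr 1; simp [h]
        _ = _ := by
            rw [inner1 i t (n + 1), groupOf_cons, if_pos h]
    · calc List.foldl
            (fun (sf : String × Int) ns =>
              if ns.2.2 == i && sf.2 == 0 then (sf.1 ++ ns.2.1, 1)
              else if ns.2.2 == i && sf.2 == 1 then (sf.1 ++ ";" ++ ns.2.1, sf.2)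
              else sf)
            (str, 0) ((n, s) :: PySem.List.enumerate t (n + 1))
          = List.foldl
            (fun (sf : String × Int) ns =>
              if ns.2.2 == i && sf.2 == 0 then (sf.1 ++ ns.2.1, 1)
              else if ns.2.2 == i && sf.2 == 1 then (sf.1 ++ ";" ++ ns.2.1, sf.2)
              else sf)
            (str, 0) (PySem.List.enumerate t (n + 1)) := by
            rw [List.foldl_cons]; congr 1; simp [h]
        _ = _ := by
            rw [ih (n + 1), groupOf_cons, if_neg h]

theorem dictGroup (l : List (String × Int)) :
    ∀ (d : PySem.Dict Int (List String)) (i : Int),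
    (l.foldl (fun d s => d.modify s.2 [] (fun xs => xs ++ [s.1])) d).getD i []
    = d.getD i [] ++ groupOf i l := by
  induction l with
  | nil => intro d i; simp [groupOf]
  | cons s t ih =>
    intro d i
    rw [List.foldl_cons, ih, groupOf_cons]
    by_cases h : s.2 = i
    · subst h
      rw [PySem.Dict.getD_modify_self]
      simp
    · rw [PySem.Dict.getD_modify_of_ne]
      · simp [h]
      · exact fun hc => h hc.symm

theorem stringEq (i : Int) (l : List (String × Int)) :
    ((PySem.List.enumerate l 0).foldl
      (fun (sf : String × Int) ns =>
        if ns.2.2 == i && sf.2 == 0 then (sf.1 ++ ns.2.1, 1)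
        else if ns.2.2 == i && sf.2 == 1 then (sf.1 ++ ";" ++ ns.2.1, sf.2)
        else sf) ("", 0)).1
    = PySem.Str.join ";" (groupOf i l) := by
  rw [inner0 i l 0 ""]
  cases hg : groupOf i l with
  | nil =>
    show ("" : String) = PySem.Str.join ";" []
    apply String.toList_inj.mp
    simp [PySem.Chars.join_nil]
  | cons x g =>
    show ("" : String) ++ x ++ tailJoin g = PySem.Str.join ";" (x :: g)
    rw [show ("" : String) ++ x ++ tailJoin g = x ++ tailJoin g by rw [String.empty_append]]
    exact joinEq g x

-- ===== VERDICT (by name: the statement is the Claim_ definition above) =====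
theorem unrepeat_spec : Claim_equal_unrepeat := by
  intro l _
  unfold Spec_unrepeat
  simp only [unrepeat, unrepeat_alt]
  apply PySem.List.foldl_congr_mem
  intro acc i _
  show (let sf := (PySem.List.enumerate l 0).foldl
          (fun (sf : String × Int) ns =>
            if ns.2.2 == i && sf.2 == 0 then (sf.1 ++ ns.2.1, 1)
            else if ns.2.2 == i && sf.2 == 1 then (sf.1 ++ ";" ++ ns.2.1, sf.2)
            else sf) ("", 0)
        if sf.1 ≠ "" then acc ++ [sf.1] else acc ++ ["其他"])
      = acc ++ [if PySem.Str.join ";" ((l.foldl (fun d s => d.modify s.2 [] (fun xs => xs ++ [s.1]))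
            PySem.Dict.empty).getD i []) ≠ "" then
          PySem.Str.join ";" ((l.foldl (fun d s => d.modify s.2 [] (fun xs => xs ++ [s.1]))
            PySem.Dict.empty).getD i []) else "其他"]
  simp only [stringEq i l, dictGroup l PySem.Dict.empty i]
  have he : (PySem.Dict.empty : PySem.Dict Int (List String)).getD i [] = [] := rfl
  rw [he, List.nil_append]
  split_ifs <;> rfl
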